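-- pv_equiv track=rewrite | github.com/wuxu1019/leetcode_sophia | medium/math/test_754_Reach_a_Number.py | reachNumber_bfs
-- ===== SOURCE A (Python) =====
-- def reachNumber_bfs(target):
--     """
--     :type target: int
--     :rtype: int
--     """
--     if target == 0:
--         return 0
--     pos, new_pos = set([0]), set()
--     step = 1
--     while True:
--         for i in pos:
--             new_pos.add(i + step)
--             new_pos.add(i - step)
--             if target in new_pos:
--                 return step
--         pos, new_pos = new_pos, set()
--         step += 1
-- ===== SOURCE B (Python) =====
-- def reachNumber_bfs(target):
--     """
--     :type target: int
--     :rtype: int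
--     """
--     t = abs(target)
--     k = 0
--     s = 0
--     while s < t or (s - t) % 2 != 0:
--         k += 1
--         s += k
--     return k
-- ===== Notes on version B (the rewrite author's own statement) =====
-- stated objective: faster
-- what changed: Replaces the breadth-first exploration of all reachable positions (a set that grows with every step) by the arithmetic characterisation: accumulate successive step sums until the running total reaches the target's magnitude with matching parity.
import Mathlib
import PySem

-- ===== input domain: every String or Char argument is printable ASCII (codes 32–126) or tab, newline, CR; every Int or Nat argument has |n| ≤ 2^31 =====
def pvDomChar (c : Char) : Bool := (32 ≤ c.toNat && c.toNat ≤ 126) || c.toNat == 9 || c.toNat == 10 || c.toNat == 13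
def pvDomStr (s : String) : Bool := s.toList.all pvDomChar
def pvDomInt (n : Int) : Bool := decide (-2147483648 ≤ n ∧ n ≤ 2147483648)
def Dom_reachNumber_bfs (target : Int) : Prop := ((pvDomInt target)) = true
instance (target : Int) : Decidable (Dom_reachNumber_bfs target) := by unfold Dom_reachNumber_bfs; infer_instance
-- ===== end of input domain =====

-- B replaces A's breadth-first exploration of all reachable positions by the arithmetic
-- characterisation: accumulate successive step sums until the total reaches the target's
-- magnitude with matching parity.

-- ===== PORT A =====
-- inner 'for i in pos: new_pos.add(i+step); new_pos.add(i-step); if target in new_pos: return step'.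
-- The sets are internal state only (never returned), so they are modelled by Std.TreeSet Int —
-- exact as a finite set of ints, with membership/insert costs comparable to Python's set.
-- Python iterates the set in hash order; the returned value (the step count) does not depend on
-- that order, so folding over the TreeSet's element list is exact. 'none' = 'return step'.
def bfsInner (target step : Int) : List Int → Std.TreeSet Int → Option (Std.TreeSet Int)
  | [], np => some np
  | i :: rest, np =>
      let np1 := (np.insert (i + step)).insert (i - step)
      if np1.contains target then none
      else bfsInner target step rest np1

-- 'while True' ported with fuel; fuel |target|+3 is proved sufficient below (bfsLoop_eq), so the
-- fuel-0 branch is never reached on any input and the port agrees with the Python everywhere.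
def bfsLoop (target : Int) : Nat → Std.TreeSet Int → Int → Int
  | 0, _, step => step
  | fuel + 1, pos, step =>
      match bfsInner target step pos.toList Std.TreeSet.empty with
      | none => step
      | some np => bfsLoop target fuel np (step + 1)

def reachNumber_bfs (target : Int) : Int :=
  if target = 0 then 0
  else bfsLoop target (target.natAbs + 3) (Std.TreeSet.empty.insert 0) 1

-- ===== PORT B =====
-- 'while s < t or (s - t) % 2: k += 1; s += k' ported with fuel; fuel |target|+3 is proved
-- sufficient below (altLoop_eq), so the fuel-0 branch is never reached on any input.
def altLoop (t : Int) : Nat → Int → Int → Int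
  | 0, _, k => k
  | fuel + 1, s, k =>
      if s < t ∨ PySem.Int.mod (s - t) 2 ≠ 0 then altLoop t fuel (s + (k + 1)) (k + 1)
      else k

def reachNumber_bfs_alt (target : Int) : Int :=
  altLoop target.natAbs (target.natAbs + 3) 0 0

-- ===== PRECONDITION & SPEC =====
def Spec_reachNumber_bfs (target : Int) (out : Int) : Prop := out = reachNumber_bfs_alt target
instance (target : Int) (out : Int) : Decidable (Spec_reachNumber_bfs target out) := by unfold Spec_reachNumber_bfs; infer_instance

-- ===== CLAIM (what is proved, stated in full; the proofs are below) =====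
def Claim_equal_reachNumber_bfs : Prop := ∀ (target : Int), Dom_reachNumber_bfs target → Spec_reachNumber_bfs target (reachNumber_bfs target)

-- ===== LEMMAS AND PROOFS =====

-- triSum k = the sum of the first k positive integers
def triSum : Nat → Int
  | 0 => 0
  | k + 1 => triSum k + (k + 1)

theorem triSum_ge (k : Nat) : (k : Int) ≤ triSum k := by
  induction k with
  | zero => simp [triSum]
  | succ n ih => simp only [triSum]; push_cast; omega

theorem triSum_succ (k : Nat) : triSum (k + 1) = triSum k + ((k : Int) + 1) := by
  rw [show triSum (k + 1) = triSum k + ((k + 1 : Nat) : Int) from rfl]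
  push_cast; ring

-- the set reachable after exactly k steps: |v| ≤ S k and v ≡ S k (mod 2)
abbrev reachP (k : Nat) (v : Int) : Prop :=
  -(triSum k) ≤ v ∧ v ≤ triSum k ∧ (v - triSum k) % 2 = 0

theorem exists_stop (t : Int) : ∃ k, reachP k t := by
  by_cases h : (t - triSum t.natAbs) % 2 = 0
  · exact ⟨t.natAbs, by have := triSum_ge t.natAbs; unfold reachP; omega⟩
  · refine ⟨t.natAbs + 2, ?_⟩
    have h1 := triSum_ge t.natAbs
    have h2 : triSum (t.natAbs + 2) = triSum t.natAbs + (t.natAbs + 1) + (t.natAbs + 2) := by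
      rw [show t.natAbs + 2 = (t.natAbs + 1) + 1 from rfl, triSum_succ, triSum_succ]; push_cast; ring
    unfold reachP; omega

-- the answer: the least k with reachP k t
def kstar (t : Int) : Nat := Nat.find (exists_stop t)

theorem kstar_spec (t : Int) : reachP (kstar t) t := Nat.find_spec (exists_stop t)

theorem kstar_min (t : Int) {j : Nat} (h : j < kstar t) : ¬ reachP j t :=
  Nat.find_min (exists_stop t) h

theorem kstar_le (t : Int) : kstar t ≤ t.natAbs + 2 := by
  unfold kstar
  by_cases h : (t - triSum t.natAbs) % 2 = 0
  · have hr : reachP t.natAbs t := by have := triSum_ge t.natAbs; unfold reachP; omega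
    exact le_trans (Nat.find_le hr) (by omega)
  · have h1 := triSum_ge t.natAbs
    have h2 : triSum (t.natAbs + 2) = triSum t.natAbs + (t.natAbs + 1) + (t.natAbs + 2) := by
      rw [show t.natAbs + 2 = (t.natAbs + 1) + 1 from rfl, triSum_succ, triSum_succ]; push_cast; ring
    have hr : reachP (t.natAbs + 2) t := by unfold reachP; omega
    exact Nat.find_le hr

theorem kstar_pos (t : Int) (ht : t ≠ 0) : 0 < kstar t := by
  rcases Nat.eq_zero_or_pos (kstar t) with h | h
  · have := kstar_spec t
    rw [h] at this
    unfold reachP triSum at this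
    omega
  · exact h

-- ---- B side ----

theorem pymod_two (x : Int) : PySem.Int.mod x 2 = 0 ↔ x % 2 = 0 := by
  rw [PySem.Int.mod_eq_emod_of_pos (by omega)]

theorem guard_iff (t : Int) (k : Nat) :
    ¬ (triSum k < (t.natAbs : Int) ∨ PySem.Int.mod (triSum k - t.natAbs) 2 ≠ 0) ↔ reachP k t := by
  rw [not_or, not_not, pymod_two]
  unfold reachP
  omega

theorem altLoop_eq (t : Int) : ∀ (fuel k : Nat), k ≤ kstar t → kstar t < k + fuel →
    altLoop t.natAbs fuel (triSum k) (k : Int) = (kstar t : Int) := by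
  intro fuel
  induction fuel with
  | zero => intro k h1 h2; omega
  | succ n ih =>
    intro k h1 h2
    simp only [altLoop]
    by_cases hk : k = kstar t
    · subst hk
      rw [if_neg ((guard_iff t (kstar t)).2 (kstar_spec t))]
    · have hlt : k < kstar t := lt_of_le_of_ne h1 hk
      rw [if_pos (by
        by_contra hg
        exact kstar_min t hlt ((guard_iff t k).1 hg))]
      have hs : triSum k + ((k : Int) + 1) = triSum (k + 1) := (triSum_succ k).symm
      have hc : (k : Int) + 1 = ((k + 1 : Nat) : Int) := by push_cast; ring
      rw [hs, hc]
      exact ih (k + 1) hlt (by omega)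

-- ---- A side ----

-- the fold the inner loop performs on new_pos
def addBoth (step : Int) (np : Std.TreeSet Int) (i : Int) : Std.TreeSet Int :=
  (np.insert (i + step)).insert (i - step)

theorem mem_addBoth (step : Int) (np : Std.TreeSet Int) (i v : Int) :
    v ∈ addBoth step np i ↔ v ∈ np ∨ v = i + step ∨ v = i - step := by
  unfold addBoth
  simp [Std.TreeSet.mem_insert, Std.LawfulEqCmp.compare_eq_iff_eq]
  aesop

theorem mem_foldl_addBoth (step : Int) (l : List Int) (np : Std.TreeSet Int) (v : Int) :
    v ∈ l.foldl (addBoth step) np ↔ v ∈ np ∨ ∃ i ∈ l, v = i + step ∨ v = i - step := by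
  induction l generalizing np with
  | nil => simp
  | cons a l ih =>
    simp only [List.foldl_cons, ih, mem_addBoth, List.mem_cons]
    aesop

theorem mem_foldl_addBoth_of_mem (step : Int) (l : List Int) (np : Std.TreeSet Int) (v : Int)
    (h : v ∈ np) : v ∈ l.foldl (addBoth step) np :=
  (mem_foldl_addBoth step l np v).2 (Or.inl h)

theorem bfsInner_spec (target step : Int) (l : List Int) (np : Std.TreeSet Int)
    (h : target ∉ np) :
    bfsInner target step l np =
      if target ∈ l.foldl (addBoth step) np then none else some (l.foldl (addBoth step) np) := by
  induction l generalizing np with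
  | nil => simp [bfsInner, h]
  | cons a l ih =>
    simp only [bfsInner, List.foldl_cons]
    by_cases hc : target ∈ addBoth step np a
    · rw [if_pos (by rw [Std.TreeSet.contains_iff_mem]; exact hc),
        if_pos (mem_foldl_addBoth_of_mem step l _ target hc)]
    · rw [if_neg (by simp only [Std.TreeSet.contains_iff_mem]; exact hc)]
      exact ih (addBoth step np a) hc

-- one BFS layer: from the exact reach-set after k steps to the one after k+1 steps
theorem reachP_step (k : Nat) (v : Int) :
    (∃ i, reachP k i ∧ (v = i + ((k : Int) + 1) ∨ v = i - ((k : Int) + 1))) ↔ reachP (k + 1) v := by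
  have hs : triSum (k + 1) = triSum k + ((k : Int) + 1) := triSum_succ k
  have hg := triSum_ge k
  constructor
  · rintro ⟨i, hi, h⟩
    unfold reachP at hi ⊢
    omega
  · intro h
    unfold reachP at h ⊢
    by_cases hcase : -(triSum k) ≤ v - ((k : Int) + 1)
    · exact ⟨v - ((k : Int) + 1), by omega, Or.inl (by ring)⟩
    · exact ⟨v + ((k : Int) + 1), by omega, Or.inr (by ring)⟩

theorem layer_mem (k : Nat) (pos : Std.TreeSet Int)
    (hpos : ∀ v, v ∈ pos ↔ reachP k v) (v : Int) :
    v ∈ pos.toList.foldl (addBoth ((k : Int) + 1)) Std.TreeSet.empty ↔ reachP (k + 1) v := by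
  rw [mem_foldl_addBoth]
  rw [← reachP_step k v]
  constructor
  · rintro (h | ⟨i, hi, h⟩)
    · simp [Std.TreeSet.empty_eq_emptyc, Std.TreeSet.not_mem_emptyc] at h
    · exact ⟨i, (hpos i).1 (Std.TreeSet.mem_toList.1 hi), h⟩
  · rintro ⟨i, hi, h⟩
    exact Or.inr ⟨i, Std.TreeSet.mem_toList.2 ((hpos i).2 hi), h⟩

theorem bfsLoop_eq (t : Int) : ∀ (fuel k : Nat) (pos : Std.TreeSet Int),
    (∀ v, v ∈ pos ↔ reachP k v) → k < kstar t → kstar t ≤ k + fuel →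
    bfsLoop t fuel pos ((k : Int) + 1) = (kstar t : Int) := by
  intro fuel
  induction fuel with
  | zero => intro k pos _ h1 h2; omega
  | succ n ih =>
    intro k pos hpos h1 h2
    simp only [bfsLoop]
    rw [bfsInner_spec t ((k : Int) + 1) pos.toList Std.TreeSet.empty (by simp [Std.TreeSet.empty_eq_emptyc, Std.TreeSet.not_mem_emptyc])]
    by_cases hfound : reachP (k + 1) t
    · rw [if_pos ((layer_mem k pos hpos t).2 hfound)]
      have hk1 : kstar t = k + 1 := by
        have hle : kstar t ≤ k + 1 := by unfold kstar; exact Nat.find_le hfound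
        omega
      rw [hk1]
      push_cast
      ring
    · rw [if_neg (fun h => hfound ((layer_mem k pos hpos t).1 h))]
      have hlt : k + 1 < kstar t := by
        rcases Nat.lt_or_ge (k + 1) (kstar t) with h | h
        · exact h
        · have : kstar t = k + 1 := by omega
          exact absurd (this ▸ kstar_spec t) hfound
      have hc : (k : Int) + 1 + 1 = ((k + 1 : Nat) : Int) + 1 := by push_cast; ring
      rw [hc]
      exact ih (k + 1) _ (layer_mem k pos hpos) hlt (by omega)

theorem reach0 (v : Int) : v ∈ ((Std.TreeSet.empty : Std.TreeSet Int).insert 0) ↔ reachP 0 v := by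
  simp [Std.TreeSet.mem_insert, Std.TreeSet.empty_eq_emptyc, Std.TreeSet.not_mem_emptyc,
    Std.LawfulEqCmp.compare_eq_iff_eq, reachP, triSum]
  omega

-- ===== VERDICT (by name: the statement is the Claim_ definition above) =====
theorem reachNumber_bfs_spec : Claim_equal_reachNumber_bfs := by
  intro target _
  unfold Spec_reachNumber_bfs reachNumber_bfs reachNumber_bfs_alt
  have hle := kstar_le target
  have haltn : altLoop target.natAbs (target.natAbs + 3) (triSum 0) ((0 : Nat) : Int)
      = (kstar target : Int) :=
    altLoop_eq target (target.natAbs + 3) 0 (Nat.zero_le _) (by omega)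
  simp only [triSum, Nat.cast_zero] at haltn
  by_cases h0 : target = 0
  · subst h0
    have : kstar 0 = 0 := Nat.le_zero.1 (Nat.find_le (by unfold reachP triSum; omega))
    rw [if_pos rfl, haltn, this]
    rfl
  · rw [if_neg h0, haltn]
    have hpos := kstar_pos target h0
    have := bfsLoop_eq target (target.natAbs + 3) 0 (Std.TreeSet.empty.insert 0) reach0 hpos (by omega)
    push_cast at this
    omega
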